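-- pv_equiv track=rewrite | github.com/Gwizzlyy/cs405proj | test cases/redemption_tester.py | can_empty
-- ===== SOURCE A (Python) =====
-- valid = {}
--
-- def can_empty(in_str):
--     if not in_str:
--         return True
--     if in_str in valid:
--         return valid[in_str]
--
--     # Core Logic to reduce string
--     i = 0
--     can = False
--     while i < len(in_str) and not can:
--         j = i
--         while j + 1 < len(in_str) and in_str[j + 1] == in_str[i]:
--             j += 1
--         if j != i:
--             can = can_empty(in_str[:i] + in_str[j + 1:])
--         i = j + 1
--
--     valid[in_str] = can
--     return can
-- ===== SOURCE B (Python) =====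
-- def can_empty(in_str):
--     # Interval DP (remove-boxes / Zuma style) over the run-length encoding:
--     # E(i, j)    = runs[i:j] can be fully removed;
--     # G(i, j, k) = k extra copies of runs[i]'s char glued in front of runs[i:j]
--     #              can be fully removed.  Either the front group (count n+k) is
--     #              removed first (needs n+k >= 2 and E(i+1, j)), or the segment
--     #              between the front group and a later run t of the same char is
--     #              emptied on its own, merging the front group into run t.
--     runs = []
--     for ch in in_str:
--         if runs and runs[-1][0] == ch:
--             runs[-1] = (ch, runs[-1][1] + 1)
--         else:
--             runs.append((ch, 1))
--     memo = {}
--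
--     def E(i, j):
--         if i == j:
--             return True
--         return G(i, j, 0)
--
--     def G(i, j, k):
--         key = (i, j, k)
--         if key in memo:
--             return memo[key]
--         c, n = runs[i]
--         res = n + k >= 2 and E(i + 1, j)
--         t = i + 2
--         while not res and t < j:
--             if runs[t][0] == c and E(i + 1, t) and G(t, j, n + k):
--                 res = True
--             t += 1
--         memo[key] = res
--         return res
--
--     return E(0, len(runs))
-- ===== Notes on version B (the rewrite author's own statement) =====
-- stated objective: faster
-- what changed: B replaces A's memoized recursive search over all reachable strings with a remove-boxes/Zuma-style interval dynamic program over the run-length encoding: state (i, j, k) asks whether runs[i:j] with k extra copies of runs[i]'s character glued in front can be emptied, so only polynomially many states exist instead of exponentially many reachable strings.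
import Mathlib
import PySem

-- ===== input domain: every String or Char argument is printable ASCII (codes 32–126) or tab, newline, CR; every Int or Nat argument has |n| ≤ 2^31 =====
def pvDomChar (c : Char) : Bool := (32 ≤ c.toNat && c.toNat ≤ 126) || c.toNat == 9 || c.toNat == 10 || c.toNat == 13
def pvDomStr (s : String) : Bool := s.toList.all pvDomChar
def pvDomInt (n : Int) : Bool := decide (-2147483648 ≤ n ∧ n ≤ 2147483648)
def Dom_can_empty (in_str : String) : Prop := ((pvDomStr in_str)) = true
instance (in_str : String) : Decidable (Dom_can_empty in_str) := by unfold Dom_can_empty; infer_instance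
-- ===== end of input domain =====

-- B replaces A's memoized recursive search over reachable strings by a remove-boxes-style
-- interval DP over the run-length encoding (polynomially many states); objective: faster,
-- measured.
-- A's global memo table only caches values A itself computes, so it does not affect the
-- returned value; both ports are pure (A's port is fueled; fuel = input length suffices).

-- ===== PORT A =====
-- inner while loop: extend j while in_str[j+1] == in_str[i]
def pvInnerA (s : List Char) (c : Char) (j : Nat) : Nat :=
  if h : j + 1 < s.length then
    if s[j + 1] == c then pvInnerA s c (j + 1) else j
  else j
termination_by s.length - j

theorem pvInnerA_ge (s : List Char) (c : Char) (j : Nat) : j ≤ pvInnerA s c j := by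
  fun_induction pvInnerA s c j with
  | case1 j h hc ih => omega
  | case2 j h hc => omega
  | case3 j h => omega

-- outer while loop of A; `rec` is the recursive call can_empty(in_str[:i] + in_str[j+1:])
def pvLoopA (rec : List Char → Bool) (s : List Char) (i : Nat) : Bool :=
  if h : i < s.length then
    let j := pvInnerA s s[i] i
    let can := if j ≠ i then rec (s.take i ++ s.drop (j + 1)) else false
    can || pvLoopA rec s (j + 1)
  else false
termination_by s.length - i
decreasing_by
  have := pvInnerA_ge s s[i] i
  omega

def pvCanA : Nat → List Char → Bool
  | _, [] => true                       -- if not in_str: return True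
  | 0, _ => false                       -- fuel (never reached: each call drops ≥ 2 chars)
  | fuel + 1, s => pvLoopA (pvCanA fuel) s 0

def can_empty (in_str : String) : Bool :=
  pvCanA in_str.toList.length in_str.toList

-- ===== PORT B =====
-- run-length encoding loop; runs are accumulated head-first (Python appends at the tail
-- and reads runs[-1]; here the head of the accumulator is Python's runs[-1]), reversed at the end
def pvStep (acc : List (Char × Nat)) (ch : Char) : List (Char × Nat) :=
  match acc with
  | (c, n) :: t => if c == ch then (ch, n + 1) :: t else (ch, 1) :: (c, n) :: t
  | [] => [(ch, 1)]

-- the interval DP of Source B: pvE i j = E(i, j), pvG i j k = G(i, j, k), and pvLoopT is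
-- G's `while` loop over t.  The `i < j` / `i + 2 ≤ t ∧ t < j` guards only totalize the
-- recursion: Python always calls E/G with i < j (E handles i = j first) and runs the
-- loop with t in [i+2, j), so inside those ranges the guards never alter the result.
mutual
def pvE (rs : List (Char × Nat)) (i j : Nat) : Bool :=
  if i = j then true else pvG rs i j 0
termination_by ((j - i) + 1, 2, 0)

def pvG (rs : List (Char × Nat)) (i j k : Nat) : Bool :=
  if _h : i < j then
    (decide (2 ≤ (rs.getD i (' ', 0)).2 + k) && pvE rs (i + 1) j) || pvLoopT rs i j k (i + 2)
  else false
termination_by ((j - i) + 1, 1, 0)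

def pvLoopT (rs : List (Char × Nat)) (i j k t : Nat) : Bool :=
  if _h : i + 2 ≤ t ∧ t < j then
    ((rs.getD t (' ', 0)).1 == (rs.getD i (' ', 0)).1
        && pvE rs (i + 1) t && pvG rs t j ((rs.getD i (' ', 0)).2 + k))
      || pvLoopT rs i j k (t + 1)
  else false
termination_by ((j - i) + 1, 0, j - t)
end

def can_empty_alt (in_str : String) : Bool :=
  let runs := (in_str.toList.foldl pvStep []).reverse
  pvE runs 0 runs.length

-- ===== PRECONDITION & SPEC =====
def Spec_can_empty (in_str : String) (out : Bool) : Prop := out = can_empty_alt in_str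
instance (in_str : String) (out : Bool) : Decidable (Spec_can_empty in_str out) := by unfold Spec_can_empty; infer_instance

-- ===== CLAIM (what is proved, stated in full; the proofs are below) =====
def Claim_equal_can_empty : Prop := ∀ (in_str : String), Dom_can_empty in_str → Spec_can_empty in_str (can_empty in_str)

-- ===== LEMMAS AND PROOFS =====

-- ---------- run-length-encoding infrastructure (shared by both sides of the proof) ----------

-- decode a run list back to the string it encodes
def decodeR (rs : List (Char × Nat)) : List Char := rs.flatMap fun p => List.replicate p.2 p.1

def totalLen (rs : List (Char × Nat)) : Nat := (rs.map (·.2)).sum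

-- well-formed run list: positive counts, adjacent runs have distinct characters
def WFruns (rs : List (Char × Nat)) : Prop :=
  (∀ p ∈ rs, 1 ≤ p.2) ∧ rs.IsChain (fun a b => a.1 ≠ b.1)

-- prepend a run, merging with the head if same character
def consMerge (p : Char × Nat) (rs : List (Char × Nat)) : List (Char × Nat) :=
  match rs with
  | (c, m) :: r => if p.1 == c then (p.1, p.2 + m) :: r else p :: rs
  | [] => [p]

def encodeR (s : List Char) : List (Char × Nat) := s.foldr (fun c acc => consMerge (c, 1) acc) []

-- remove run t and merge the equal neighbour runs this exposes (the elementary move of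
-- the reduction game, used only by the proofs)
def pvRemoveMergeAt (rs : List (Char × Nat)) (t : Nat) : List (Char × Nat) :=
  let left := rs.take t
  let right := rs.drop (t + 1)
  match left.getLast?, right with
  | some (c, n), (c', m) :: r =>
      if c == c' then left.dropLast ++ (c, n + m) :: r else left ++ right
  | _, _ => left ++ right

-- reference form of A's search on run lists
def pvCanR : Nat → List (Char × Nat) → Bool
  | _, [] => true
  | 0, _ => false
  | fuel + 1, rs =>
      (List.range rs.length).any fun t =>
        decide (2 ≤ (rs.getD t (' ', 0)).2) && pvCanR fuel (pvRemoveMergeAt rs t)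

theorem decodeR_append (a b : List (Char × Nat)) : decodeR (a ++ b) = decodeR a ++ decodeR b := by
  simp [decodeR]

theorem decodeR_consMerge (p : Char × Nat) (rs : List (Char × Nat)) :
    decodeR (consMerge p rs) = List.replicate p.2 p.1 ++ decodeR rs := by
  obtain ⟨c, n⟩ := p
  match rs with
  | [] => simp [consMerge, decodeR]
  | (c', m) :: r =>
    by_cases h : c = c'
    · subst h
      simp only [consMerge, beq_self_eq_true, if_true, decodeR, List.flatMap_cons]
      rw [List.replicate_add, List.append_assoc]
    · simp [consMerge, decodeR, h]

theorem decodeR_encodeR (s : List Char) : decodeR (encodeR s) = s := by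
  induction s with
  | nil => simp [encodeR, decodeR]
  | cons c s ih =>
    show decodeR (consMerge (c, 1) (encodeR s)) = c :: s
    rw [decodeR_consMerge]
    simp [ih]

theorem consMerge_consMerge (c : Char) (n : Nat) (rs : List (Char × Nat)) :
    consMerge (c, n) (consMerge (c, 1) rs) = consMerge (c, n + 1) rs := by
  match rs with
  | [] => simp [consMerge]
  | (c', m) :: r =>
    by_cases h : c = c'
    · subst h; simp [consMerge]; omega
    · simp [consMerge, h]

theorem head_consMerge (c : Char) (n : Nat) (rs : List (Char × Nat)) :
    ∃ k r, consMerge (c, n) rs = (c, k) :: r ∧ n ≤ k := by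
  match rs with
  | [] => exact ⟨n, [], rfl, le_rfl⟩
  | (c', m) :: r =>
    by_cases h : c = c'
    · subst h; exact ⟨n + m, r, by simp [consMerge], by omega⟩
    · exact ⟨n, (c', m) :: r, by simp [consMerge, h], le_rfl⟩

theorem foldl_pvStep (s : List Char) :
    ∀ (c : Char) (n : Nat) (t : List (Char × Nat)),
      (List.foldl pvStep ((c, n) :: t) s).reverse = t.reverse ++ consMerge (c, n) (encodeR s) := by
  induction s with
  | nil => intro c n t; simp [encodeR, consMerge]
  | cons x s ih =>
    intro c n t
    by_cases h : c = x
    · subst h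
      have : pvStep ((c, n) :: t) c = (c, n + 1) :: t := by simp [pvStep]
      rw [List.foldl_cons, this, ih]
      show _ = t.reverse ++ consMerge (c, n) (consMerge (c, 1) (encodeR s))
      rw [consMerge_consMerge]
    · have : pvStep ((c, n) :: t) x = (x, 1) :: (c, n) :: t := by simp [pvStep, h]
      rw [List.foldl_cons, this, ih]
      show _ = t.reverse ++ consMerge (c, n) (consMerge (x, 1) (encodeR s))
      obtain ⟨k, r, hk, -⟩ := head_consMerge x 1 (encodeR s)
      rw [hk]
      have : consMerge (c, n) ((x, k) :: r) = (c, n) :: (x, k) :: r := by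
        simp [consMerge, h]
      rw [this]
      simp

theorem foldl_pvStep_nil (s : List Char) : (List.foldl pvStep [] s).reverse = encodeR s := by
  match s with
  | [] => rfl
  | x :: s =>
    have : pvStep [] x = [(x, 1)] := rfl
    rw [List.foldl_cons, this, foldl_pvStep]
    simp [encodeR]

theorem WFruns_encodeR (s : List Char) : WFruns (encodeR s) := by
  induction s with
  | nil => exact ⟨by simp [encodeR], by simp [encodeR]⟩
  | cons c s ih =>
    obtain ⟨hcnt, hch⟩ := ih
    show WFruns (consMerge (c, 1) (encodeR s))
    match hrs : encodeR s with
    | [] => exact ⟨by simp [consMerge], by simp [consMerge]⟩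
    | (c', m) :: r =>
      rw [hrs] at hcnt hch
      by_cases h : c = c'
      · subst h
        rw [List.isChain_cons] at hch
        refine ⟨?_, ?_⟩
        · simp only [consMerge, beq_self_eq_true, if_true]
          intro p hp
          rcases List.mem_cons.mp hp with h1 | h2
          · subst h1; omega
          · exact hcnt p (List.mem_cons_of_mem _ h2)
        · simp only [consMerge, beq_self_eq_true, if_true]
          rw [List.isChain_cons]
          exact ⟨hch.1, hch.2⟩
      · have hcm : consMerge (c, 1) ((c', m) :: r) = (c, 1) :: (c', m) :: r := by
          simp [consMerge, h]
        rw [hcm]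
        refine ⟨?_, ?_⟩
        · intro p hp
          rcases List.mem_cons.mp hp with h1 | h2
          · subst h1; omega
          · exact hcnt p h2
        · rw [List.isChain_cons_cons]
          exact ⟨h, hch⟩

theorem totalLen_decodeR (rs : List (Char × Nat)) : (decodeR rs).length = totalLen rs := by
  induction rs with
  | nil => rfl
  | cons p r ih => simp [decodeR, totalLen] at ih ⊢


theorem drop_head?_getElem (s : List Char) (j : Nat) (h : j < s.length) :
    (s.drop j).head? = some s[j] := by
  rw [List.head?_eq_getElem?, List.getElem?_drop]
  simp [h]

theorem pvInnerA_spec (m : Nat) : ∀ (s tail : List Char) (c : Char) (j : Nat),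
    s.drop (j + 1) = List.replicate m c ++ tail →
    (∀ x, tail.head? = some x → x ≠ c) →
    pvInnerA s c j = j + m := by
  induction m with
  | zero =>
    intro s tail c j hdrop htail
    simp only [List.replicate_zero, List.nil_append] at hdrop
    subst hdrop
    rw [pvInnerA]
    by_cases h : j + 1 < s.length
    · rw [dif_pos h]
      have hne : s[j + 1] ≠ c := htail _ (drop_head?_getElem s (j + 1) h)
      simp [hne]
    · rw [dif_neg h]; omega
  | succ m ih =>
    intro s tail c j hdrop htail
    have hdc : s.drop (j + 1) = c :: (List.replicate m c ++ tail) := by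
      simpa [List.replicate_succ] using hdrop
    have hlen : j + 1 < s.length := by
      have : 0 < (s.drop (j + 1)).length := by rw [hdc]; simp
      simp at this; omega
    have hc : s[j + 1] = c := by
      have h2 := drop_head?_getElem s (j + 1) hlen
      rw [hdc] at h2
      simpa using h2.symm
    rw [pvInnerA, dif_pos hlen]
    have hbeq : (s[j + 1] == c) = true := by simp [hc]
    rw [if_pos hbeq]
    have hdrop2 : s.drop (j + 1 + 1) = List.replicate m c ++ tail := by
      have hdd : s.drop (j + 1 + 1) = (s.drop (j + 1)).drop 1 := by rw [List.drop_drop]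
      rw [hdd, hdc]
      simp
    rw [ih s tail c (j + 1) hdrop2 htail]
    omega

theorem any_congr_mem {α : Type} : ∀ (l : List α) (f g : α → Bool),
    (∀ x ∈ l, f x = g x) → l.any f = l.any g := by
  intro l f g h
  induction l with
  | nil => rfl
  | cons x l ih =>
    simp only [List.any_cons]
    rw [h x (by simp), ih fun y hy => h y (by simp [hy])]

theorem totalLen_append (a b : List (Char × Nat)) :
    totalLen (a ++ b) = totalLen a + totalLen b := by simp [totalLen]

theorem wf_sub_append (a b : List (Char × Nat)) (h : WFruns (a ++ b)) :
    WFruns a ∧ WFruns b := by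
  obtain ⟨hc, hch⟩ := h
  rw [List.isChain_append] at hch
  exact ⟨⟨fun p hp => hc p (by simp [hp]), hch.1⟩,
         ⟨fun p hp => hc p (by simp [hp]), hch.2.1⟩⟩

theorem pvRemoveMergeAt_red (l r : List (Char × Nat)) (p : Char × Nat) :
    pvRemoveMergeAt (l ++ p :: r) l.length =
      (match l.getLast?, r with
       | some (c, n), (c', m) :: r' =>
           if c == c' then l.dropLast ++ (c, n + m) :: r' else l ++ r
       | _, _ => l ++ r) := by
  have h2 : (l ++ p :: r).drop (l.length + 1) = r := by
    rw [← List.drop_drop, List.drop_left]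
    simp
  simp only [pvRemoveMergeAt]
  rw [List.take_left, h2]

theorem pvRemoveMergeAt_spec (l r : List (Char × Nat)) (p : Char × Nat)
    (hWF : WFruns (l ++ p :: r)) :
    decodeR (pvRemoveMergeAt (l ++ p :: r) l.length) = decodeR l ++ decodeR r ∧
    WFruns (pvRemoveMergeAt (l ++ p :: r) l.length) ∧
    totalLen (pvRemoveMergeAt (l ++ p :: r) l.length) = totalLen l + totalLen r ∧
    (pvRemoveMergeAt (l ++ p :: r) l.length).length ≤ l.length + r.length := by
  rw [pvRemoveMergeAt_red]
  rcases List.eq_nil_or_concat l with hl | ⟨l', q, hl⟩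
  · subst hl
    have hr : WFruns r := (wf_sub_append [p] r hWF).2
    cases r with
    | nil => exact ⟨by simp [decodeR], ⟨by simp, by simp⟩, by simp [totalLen], by simp⟩
    | cons pr r' =>
      obtain ⟨c', m⟩ := pr
      exact ⟨by simp [decodeR], by simpa using hr, by simp [totalLen], by simp⟩
  · subst hl
    obtain ⟨cq, nq⟩ := q
    rw [List.concat_eq_append] at *
    have hgl : (l' ++ [(cq, nq)]).getLast? = some (cq, nq) := List.getLast?_concat
    rw [hgl]
    cases r with
    | nil =>
      have hwl : WFruns (l' ++ [(cq, nq)]) := (wf_sub_append _ _ hWF).1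
      refine ⟨by simp [decodeR], by simpa using hwl, by simp [totalLen], by simp⟩
    | cons pr r' =>
      obtain ⟨c', m⟩ := pr
      dsimp only
      obtain ⟨hcnt, hch⟩ := hWF
      rw [List.isChain_append] at hch
      obtain ⟨hchA, hchB, hbdAB⟩ := hch
      rw [List.isChain_append] at hchA
      obtain ⟨hchl', hchq, hbdl'q⟩ := hchA
      rw [List.isChain_cons] at hchB
      obtain ⟨-, hchB2⟩ := hchB
      rw [List.isChain_cons] at hchB2
      obtain ⟨hbdr', hchr'⟩ := hchB2
      have hnq : 1 ≤ nq := hcnt (cq, nq) (by simp)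
      have hm : 1 ≤ m := hcnt (c', m) (by simp)
      by_cases hc : cq = c'
      · subst hc
        have hbeq : ((cq : Char) == cq) = true := by simp
        rw [if_pos hbeq, List.dropLast_concat]
        refine ⟨?_, ⟨?_, ?_⟩, ?_, ?_⟩
        · simp only [decodeR, List.flatMap_append, List.flatMap_cons, List.flatMap_nil,
            List.append_nil, List.append_assoc]
          rw [← List.append_assoc (List.replicate nq cq), List.replicate_append_replicate]
        · intro x hx
          rcases List.mem_append.mp hx with h1 | h2
          · exact hcnt x (by simp [h1])
          · rcases List.mem_cons.mp h2 with h3 | h4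
            · subst h3; simp; omega
            · exact hcnt x (by simp [h4])
        · rw [List.isChain_append]
          refine ⟨hchl', ?_, ?_⟩
          · rw [List.isChain_cons]
            exact ⟨fun y hy => hbdr' y hy, hchr'⟩
          · intro x hx y hy
            simp only [List.head?_cons, Option.mem_def, Option.some.injEq] at hy
            subst hy
            exact hbdl'q x hx (cq, nq) (by simp)
        · simp [totalLen]; omega
        · simp
      · have hbeq : ((cq : Char) == c') = false := by simp [hc]
        rw [if_neg (by simp [hc])]
        refine ⟨decodeR_append _ _, ⟨?_, ?_⟩, totalLen_append _ _, by simp; omega⟩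
        · intro x hx
          rcases List.mem_append.mp hx with h1 | h2
          · rcases List.mem_append.mp h1 with h1a | h1b
            · exact hcnt x (by simp [h1a])
            · exact hcnt x (by simp at h1b ⊢; tauto)
          · exact hcnt x (by simp at h2 ⊢; tauto)
        · rw [List.isChain_append]
          refine ⟨?_, ?_, ?_⟩
          · rw [List.isChain_append]
            exact ⟨hchl', hchq, hbdl'q⟩
          · rw [List.isChain_cons]
            exact ⟨fun y hy => hbdr' y hy, hchr'⟩
          · intro x hx y hy
            rw [List.getLast?_concat] at hx
            simp only [Option.mem_def, Option.some.injEq] at hx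
            subst hx
            simp only [List.head?_cons, Option.mem_def, Option.some.injEq] at hy
            subst hy
            exact hc

theorem loopA_spec (fuel : Nat) : ∀ (rsR rsL : List (Char × Nat)),
    WFruns (rsL ++ rsR) →
    pvLoopA (pvCanA fuel) (decodeR rsL ++ decodeR rsR) (decodeR rsL).length =
      (List.range rsR.length).any fun t =>
        (if 2 ≤ (rsR.getD t (' ', 0)).2
         then pvCanA fuel (decodeR (rsL ++ rsR.eraseIdx t)) else false) := by
  intro rsR
  induction rsR with
  | nil =>
    intro rsL hWF
    rw [pvLoopA]
    have h : ¬ ((decodeR rsL).length < (decodeR rsL ++ decodeR []).length) := by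
      simp [decodeR]
    rw [dif_neg h]
    simp
  | cons p rest ih =>
    obtain ⟨c, n⟩ := p
    intro rsL hWF
    have hn : 1 ≤ n := hWF.1 (c, n) (by simp)
    have hdecc : decodeR ((c, n) :: rest) = List.replicate n c ++ decodeR rest := by
      simp [decodeR]
    set s := decodeR rsL ++ decodeR ((c, n) :: rest) with hs
    have hi : (decodeR rsL).length < s.length := by
      rw [hs, hdecc]; simp; omega
    have hdropi : s.drop (decodeR rsL).length = List.replicate n c ++ decodeR rest := by
      rw [hs, List.drop_left, hdecc]
    have hgi : s[(decodeR rsL).length]'hi = c := by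
      have h1 := drop_head?_getElem s (decodeR rsL).length hi
      rw [hdropi, show n = (n - 1) + 1 by omega, List.replicate_succ] at h1
      simpa using h1.symm
    have hhead : ∀ x, (decodeR rest).head? = some x → x ≠ c := by
      cases rest with
      | nil => intro x hx; simp [decodeR] at hx
      | cons q rest' =>
        obtain ⟨c2, m2⟩ := q
        intro x hx
        have hm2 : 1 ≤ m2 := hWF.1 (c2, m2) (by simp)
        have hd2 : decodeR ((c2, m2) :: rest') = List.replicate m2 c2 ++ decodeR rest' := by
          simp [decodeR]
        rw [hd2, show m2 = (m2 - 1) + 1 by omega, List.replicate_succ] at hx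
        simp at hx
        subst hx
        have hch := hWF.2
        rw [List.isChain_append] at hch
        have hch2 := hch.2.1
        rw [List.isChain_cons_cons] at hch2
        exact fun he => hch2.1 he.symm
    have hdropi1 : s.drop ((decodeR rsL).length + 1) = List.replicate (n - 1) c ++ decodeR rest := by
      have hdd : s.drop ((decodeR rsL).length + 1) = (s.drop (decodeR rsL).length).drop 1 := by
        rw [List.drop_drop]
      rw [hdd, hdropi, show n = (n - 1) + 1 by omega, List.replicate_succ]
      simp
    have hj : pvInnerA s c (decodeR rsL).length = (decodeR rsL).length + (n - 1) :=
      pvInnerA_spec (n - 1) s (decodeR rest) c _ hdropi1 hhead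
    have htake : s.take (decodeR rsL).length = decodeR rsL := by
      rw [hs]; exact List.take_left
    have hdropj : s.drop ((decodeR rsL).length + (n - 1) + 1) = decodeR rest := by
      have hsplit : s = (decodeR rsL ++ List.replicate n c) ++ decodeR rest := by
        rw [hs, hdecc, List.append_assoc]
      have hlen2 : (decodeR rsL ++ List.replicate n c).length =
          (decodeR rsL).length + (n - 1) + 1 := by simp; omega
      rw [hsplit, ← hlen2, List.drop_left]
    have hWF' : WFruns ((rsL ++ [(c, n)]) ++ rest) := by
      rw [List.append_assoc]; simpa using hWF
    have hlen3 : (decodeR (rsL ++ [(c, n)])).length = (decodeR rsL).length + (n - 1) + 1 := by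
      rw [decodeR_append]; simp [decodeR]; omega
    have hs3 : decodeR (rsL ++ [(c, n)]) ++ decodeR rest = s := by
      rw [decodeR_append, hs, hdecc, List.append_assoc]
      simp [decodeR]
    have hcont := ih (rsL ++ [(c, n)]) hWF'
    rw [hs3, hlen3] at hcont
    -- unfold one step of the loop
    rw [pvLoopA, dif_pos hi]
    simp only [hgi, hj, htake, hdropj, hcont]
    -- reshape the RHS any over range (rest.length + 1)
    rw [show ((c, n) :: rest).length = rest.length + 1 from rfl, List.range_succ_eq_map,
      List.any_cons, List.any_map]
    have hfirst : (if (decodeR rsL).length + (n - 1) ≠ (decodeR rsL).length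
        then pvCanA fuel (decodeR rsL ++ decodeR rest) else false) =
        (if 2 ≤ ((((c, n) :: rest)).getD 0 (' ', 0)).2
        then pvCanA fuel (decodeR (rsL ++ ((c, n) :: rest).eraseIdx 0)) else false) := by
      have hg0 : (((c, n) :: rest)).getD 0 (' ', 0) = (c, n) := rfl
      rw [hg0, show ((c, n) :: rest).eraseIdx 0 = rest from rfl, decodeR_append]
      by_cases h2 : 2 ≤ n
      · rw [if_pos h2, if_pos (by omega)]
      · rw [if_neg h2, if_neg (by omega)]
    have hrestarm : ((List.range rest.length).any fun t =>
        (if 2 ≤ (rest.getD t (' ', 0)).2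
         then pvCanA fuel (decodeR ((rsL ++ [(c, n)]) ++ rest.eraseIdx t)) else false)) =
        ((List.range rest.length).any fun t =>
         (if 2 ≤ ((((c, n) :: rest)).getD (Nat.succ t) (' ', 0)).2
          then pvCanA fuel (decodeR (rsL ++ ((c, n) :: rest).eraseIdx (Nat.succ t))) else false)) := by
      apply any_congr_mem
      intro t ht
      have hgs : (((c, n) :: rest)).getD (Nat.succ t) (' ', 0) = rest.getD t (' ', 0) := rfl
      have hes : ((c, n) :: rest).eraseIdx (Nat.succ t) = (c, n) :: rest.eraseIdx t := rfl
      rw [hgs, hes, show rsL ++ (c, n) :: rest.eraseIdx t = (rsL ++ [(c, n)]) ++ rest.eraseIdx t by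
        rw [List.append_assoc]; rfl]
    rw [hfirst, hrestarm]
    rfl

theorem main_eq (K : Nat) : ∀ (rs : List (Char × Nat)) (fuelA fuelB : Nat),
    WFruns rs → totalLen rs ≤ K → totalLen rs ≤ fuelA → rs.length ≤ fuelB →
    pvCanA fuelA (decodeR rs) = pvCanR fuelB rs := by
  induction K using Nat.strong_induction_on with
  | _ K IH =>
  intro rs fuelA fuelB hWF hK hfA hfB
  match rs with
  | [] =>
    cases fuelA <;> cases fuelB <;> simp [pvCanA, pvCanR, decodeR]
  | (c, n) :: r =>
    have hn : 1 ≤ n := hWF.1 (c, n) (by simp)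
    have htl : n + totalLen r = totalLen ((c, n) :: r) := by simp [totalLen]
    have hlenc : ((c, n) :: r).length = r.length + 1 := rfl
    obtain ⟨fA, rfl⟩ : ∃ fA, fuelA = fA + 1 := ⟨fuelA - 1, by omega⟩
    obtain ⟨fB, rfl⟩ : ∃ fB, fuelB = fB + 1 := ⟨fuelB - 1, by omega⟩
    have hdec : decodeR ((c, n) :: r) = c :: (List.replicate (n - 1) c ++ decodeR r) := by
      have : n = (n - 1) + 1 := by omega
      rw [show decodeR ((c, n) :: r) = List.replicate n c ++ decodeR r by simp [decodeR], this,
        List.replicate_succ]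
      simp
    have hA : pvCanA (fA + 1) (decodeR ((c, n) :: r)) =
        pvLoopA (pvCanA fA) (decodeR ((c, n) :: r)) 0 := by
      rw [hdec]; rfl
    have hB : pvCanR (fB + 1) ((c, n) :: r) =
        (List.range ((c, n) :: r).length).any (fun t =>
          decide (2 ≤ ((((c, n) :: r)).getD t (' ', 0)).2) &&
          pvCanR fB (pvRemoveMergeAt ((c, n) :: r) t)) := rfl
    rw [hA, hB]
    have hloop := loopA_spec fA ((c, n) :: r) [] (by simpa using hWF)
    have h0 : decodeR ([] : List (Char × Nat)) = [] := rfl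
    rw [h0] at hloop
    simp only [List.nil_append, List.length_nil] at hloop
    rw [hloop]
    apply any_congr_mem
    intro u hu
    have hu' : u < ((c, n) :: r).length := List.mem_range.mp hu
    have hget : (((c, n) :: r)).getD u (' ', 0) = ((c, n) :: r)[u] :=
      List.getD_eq_getElem _ _ hu'
    by_cases h2 : 2 ≤ (((c, n) :: r)[u]).2
    · rw [hget, if_pos h2, decide_eq_true h2, Bool.true_and]
      -- decompose rs at index u
      have hsp : (c, n) :: r = ((c, n) :: r).take u ++ ((c, n) :: r)[u] :: ((c, n) :: r).drop (u + 1) := by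
        rw [← List.drop_eq_getElem_cons hu', List.take_append_drop]
      have hltk : (((c, n) :: r).take u).length = u := by
        simp [List.length_take]; omega
      have hrm : pvRemoveMergeAt ((c, n) :: r) u =
          pvRemoveMergeAt (((c, n) :: r).take u ++ ((c, n) :: r)[u] :: ((c, n) :: r).drop (u + 1))
            ((((c, n) :: r).take u).length) := by
        rw [hltk, ← hsp]
      have hWF' : WFruns (((c, n) :: r).take u ++ ((c, n) :: r)[u] :: ((c, n) :: r).drop (u + 1)) := by
        rw [← hsp]; exact hWF
      obtain ⟨hdecS, hwfS, htlS, hlenS⟩ :=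
        pvRemoveMergeAt_spec (((c, n) :: r).take u) (((c, n) :: r).drop (u + 1)) (((c, n) :: r)[u]) hWF'
      have htot : totalLen ((c, n) :: r) =
          totalLen (((c, n) :: r).take u) + (((c, n) :: r)[u]).2 + totalLen (((c, n) :: r).drop (u + 1)) := by
        conv_lhs => rw [hsp]
        rw [totalLen_append]
        simp [totalLen]
        omega
      have hlen : ((c, n) :: r).length =
          (((c, n) :: r).take u).length + 1 + (((c, n) :: r).drop (u + 1)).length := by
        conv_lhs => rw [hsp]
        simp
        omega
      have hAarg : decodeR (((c, n) :: r).eraseIdx u) =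
          decodeR (pvRemoveMergeAt ((c, n) :: r) u) := by
        rw [List.eraseIdx_eq_take_drop_succ, decodeR_append, hrm, hdecS]
      rw [hAarg]
      rw [hrm]
      exact IH (totalLen (pvRemoveMergeAt (((c, n) :: r).take u ++ ((c, n) :: r)[u] ::
              ((c, n) :: r).drop (u + 1)) ((((c, n) :: r).take u).length)))
        (by rw [htlS]; omega) _ fA fB hwfS le_rfl (by rw [htlS]; omega)
        (by refine le_trans hlenS ?_; omega)
    · rw [hget, if_neg h2]
      simp [h2]



-- ---------- the reduction game on strings ----------

-- "y does not start with c" / "x does not end with c"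
def NSW (c : Char) (y : List Char) : Prop := ∀ d, y.head? = some d → d ≠ c
def NEW (c : Char) (x : List Char) : Prop := ∀ d, x.getLast? = some d → d ≠ c

-- emptiability under A's move: remove a maximal run of length ≥ 2
inductive EmpS : List Char → Prop
  | nil : EmpS []
  | step (x : List Char) (c : Char) (k : Nat) (y : List Char) :
      2 ≤ k → NEW c x → NSW c y → EmpS (x ++ y) → EmpS (x ++ List.replicate k c ++ y)

theorem head?_replicate_pos (a : Nat) (c : Char) (h : 1 ≤ a) :
    (List.replicate a c).head? = some c := by
  cases a with
  | zero => omega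
  | succ a => simp [List.replicate_succ]

theorem getLast?_replicate_pos (a : Nat) (c : Char) (h : 1 ≤ a) :
    (List.replicate a c).getLast? = some c := by
  cases a with
  | zero => omega
  | succ a => rw [List.replicate_succ']; exact List.getLast?_concat

theorem head?_append_left {α : Type} (y z : List α) (h : y ≠ []) :
    (y ++ z).head? = y.head? := by
  cases y with
  | nil => simp at h
  | cons a y => simp

theorem getLast?_append_right {α : Type} (y z : List α) (h : z ≠ []) :
    (y ++ z).getLast? = z.getLast? := by
  obtain ⟨b, hb⟩ := Option.isSome_iff_exists.mp (List.getLast?_isSome.mpr h)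
  rw [List.getLast?_append, hb]
  rfl

theorem nsw_mid_indep (d c : Char) (u2 v : List Char) (a b : Nat)
    (ha : 1 ≤ a) (hb : 1 ≤ b)
    (h : NSW d (u2 ++ List.replicate a c ++ v)) :
    NSW d (u2 ++ List.replicate b c ++ v) := by
  cases u2 with
  | nil =>
    intro e he
    apply h e
    simp only [List.nil_append] at he ⊢
    rw [head?_append_left _ _ (by simp; omega)] at he ⊢
    rw [head?_replicate_pos _ _ hb] at he
    rw [head?_replicate_pos _ _ ha]
    exact he
  | cons z u2 =>
    intro e he
    apply h e
    simpa using he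

theorem mid_getElem? (x : List Char) (d : Char) (k : Nat) (y : List Char) (i : Nat)
    (h1 : x.length ≤ i) (h2 : i < x.length + k) :
    (x ++ List.replicate k d ++ y)[i]? = some d := by
  rw [List.getElem?_append_left (by simp; omega), List.getElem?_append_right h1,
    List.getElem?_replicate, if_pos (by omega)]

theorem take_mid (x : List Char) (d : Char) (k : Nat) (y : List Char) (n : Nat)
    (h1 : x.length ≤ n) (h2 : n ≤ x.length + k) :
    (x ++ List.replicate k d ++ y).take n = x ++ List.replicate (n - x.length) d := by
  have e0 : n - (x ++ List.replicate k d).length = 0 := by simp; omega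
  rw [List.take_append, e0, List.take_zero, List.append_nil, List.take_append,
    List.take_of_length_le h1, List.take_replicate]
  congr 2
  omega

theorem drop_mid (x : List Char) (d : Char) (k : Nat) (y : List Char) (n : Nat)
    (h1 : x.length ≤ n) (h2 : n ≤ x.length + k) :
    (x ++ List.replicate k d ++ y).drop n = List.replicate (x.length + k - n) d ++ y := by
  have e0 : n - (x ++ List.replicate k d).length = 0 := by simp; omega
  rw [List.drop_append, e0, List.drop_zero, List.drop_append,
    List.drop_eq_nil_of_le h1, List.drop_replicate, List.nil_append]
  congr 2
  omega

-- where a maximal run can sit relative to another block decomposition of the same string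
theorem two_runs_split
    (x : List Char) (d : Char) (k : Nat) (y u : List Char) (c : Char) (a : Nat) (v : List Char)
    (heq : x ++ List.replicate k d ++ y = u ++ List.replicate a c ++ v)
    (hk : 1 ≤ k) (ha : 1 ≤ a) (hx : NEW d x) (hy : NSW d y) :
    (d = c ∧ ∃ p q, u = x ++ List.replicate p d ∧ v = List.replicate q d ++ y ∧ k = p + a + q)
    ∨ (∃ u2, u = x ++ List.replicate k d ++ u2 ∧ y = u2 ++ List.replicate a c ++ v)
    ∨ (∃ v1, x = u ++ List.replicate a c ++ v1 ∧ v = v1 ++ List.replicate k d ++ y) := by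
  by_cases hA : x.length + k ≤ u.length
  · -- the d-run lies strictly inside u
    right; left
    have h1 : (x ++ List.replicate k d) <+: (u ++ List.replicate a c ++ v) := ⟨y, heq⟩
    have h2 : u <+: (u ++ List.replicate a c ++ v) :=
      ⟨List.replicate a c ++ v, (List.append_assoc _ _ _).symm⟩
    obtain ⟨u2, hu2⟩ := List.prefix_of_prefix_length_le h1 h2 (by simp; omega)
    refine ⟨u2, hu2.symm, ?_⟩
    refine List.append_cancel_left (as := x ++ List.replicate k d) ?_
    rw [heq, ← hu2]
    simp [List.append_assoc]
  · by_cases hB : u.length + a ≤ x.length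
    · -- the d-run lies strictly to the right of the c-block
      right; right
      have h1 : (u ++ List.replicate a c) <+: (x ++ List.replicate k d ++ y) :=
        ⟨v, heq.symm⟩
      have h2 : x <+: (x ++ List.replicate k d ++ y) :=
        ⟨List.replicate k d ++ y, (List.append_assoc _ _ _).symm⟩
      obtain ⟨v1, hv1⟩ := List.prefix_of_prefix_length_le h1 h2 (by simp; omega)
      refine ⟨v1, hv1.symm, ?_⟩
      refine List.append_cancel_left (as := u ++ List.replicate a c) ?_
      rw [← heq, ← hv1]
      simp [List.append_assoc]
    · -- overlap: the run covers the whole block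
      left
      push_neg at hA hB
      have hdc : d = c := by
        have e1 := mid_getElem? x d k y (max x.length u.length)
          (le_max_left _ _) (by omega)
        have e2 := mid_getElem? u c a v (max x.length u.length)
          (le_max_right _ _) (by omega)
        rw [heq, e2] at e1
        exact (Option.some.inj e1).symm
      subst hdc
      have hxu : x.length ≤ u.length := by
        by_contra hcon
        push_neg at hcon
        have e1 : (x ++ List.replicate k d ++ y)[x.length - 1]? = x.getLast? := by
          rw [List.getElem?_append_left (by simp; omega),
            List.getElem?_append_left (by omega), List.getLast?_eq_getElem?]
        have e2 := mid_getElem? u d a v (x.length - 1) (by omega) (by omega)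
        rw [heq, e2] at e1
        exact hx d e1.symm rfl
      have hend : u.length + a ≤ x.length + k := by
        by_contra hcon
        push_neg at hcon
        have e1 : (x ++ List.replicate k d ++ y)[x.length + k]? = y.head? := by
          rw [List.getElem?_append_right (by simp), List.head?_eq_getElem?]
          congr 1
          simp
        have e2 := mid_getElem? u d a v (x.length + k) (by omega) (by omega)
        rw [heq, e2] at e1
        exact hy d e1.symm rfl
      refine ⟨rfl, u.length - x.length, x.length + k - (u.length + a), ?_, ?_, ?_⟩
      · have t1 : (x ++ List.replicate k d ++ y).take u.length =
            x ++ List.replicate (u.length - x.length) d := take_mid x d k y u.length hxu (by omega)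
        have t2 : (u ++ List.replicate a d ++ v).take u.length = u := by
          rw [List.append_assoc, List.take_left]
        rw [heq, t2] at t1
        exact t1
      · have t1 : (x ++ List.replicate k d ++ y).drop (u.length + a) =
            List.replicate (x.length + k - (u.length + a)) d ++ y :=
          drop_mid x d k y (u.length + a) (by omega) (by omega)
        have t2 : (u ++ List.replicate a d ++ v).drop (u.length + a) = v := by
          rw [List.append_assoc, ← List.drop_drop, List.drop_left, List.drop_left']
          simp
        rw [heq, t2] at t1
        exact t1
      · have hlen := congrArg List.length heq
        simp at hlen
        omega

-- increasing the multiplicity of a run preserves emptiability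
theorem empS_mono : ∀ s, EmpS s → ∀ (u : List Char) (c : Char) (a b : Nat) (v : List Char),
    s = u ++ List.replicate a c ++ v → 1 ≤ a → a ≤ b →
    EmpS (u ++ List.replicate b c ++ v) := by
  intro s hs
  induction hs with
  | nil =>
    intro u c a b v heq ha hab
    exfalso
    have := congrArg List.length heq
    simp at this
    omega
  | step x d k y hk hx hy h ih =>
    intro u c a b v heq ha hab
    rcases two_runs_split x d k y u c a v heq (by omega) ha hx hy with
      ⟨rfl, p, q, hu, hv, hkpq⟩ | ⟨u2, hu, hy2⟩ | ⟨v1, hx2, hv⟩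
    · subst hu; subst hv
      have := EmpS.step x d (p + b + q) y (by omega) hx hy h
      simpa only [List.replicate_add, List.append_assoc] using this
    · subst hu; subst hy2
      have hshape : (x ++ List.replicate k d ++ u2) ++ List.replicate b c ++ v =
          x ++ List.replicate k d ++ (u2 ++ List.replicate b c ++ v) := by
        simp [List.append_assoc]
      rw [hshape]
      refine EmpS.step x d k (u2 ++ List.replicate b c ++ v) hk hx
        (nsw_mid_indep d c u2 v a b ha (by omega) hy) ?_
      have := ih (x ++ u2) c a b v (by simp [List.append_assoc]) ha hab
      simpa [List.append_assoc] using this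
    · subst hx2; subst hv
      have hshape : u ++ List.replicate b c ++ (v1 ++ List.replicate k d ++ y) =
          (u ++ List.replicate b c ++ v1) ++ List.replicate k d ++ y := by
        simp [List.append_assoc]
      rw [hshape]
      have hx' : NEW d (u ++ List.replicate b c ++ v1) := by
        cases hv1e : v1 with
        | nil =>
          intro e he
          apply hx e
          subst hv1e
          simp only [List.append_nil] at he ⊢
          rw [getLast?_append_right _ _ (by simp; omega)] at he ⊢
          rw [getLast?_replicate_pos _ _ (by omega)] at he
          rw [getLast?_replicate_pos _ _ (by omega)]
          exact he
        | cons z v1' =>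
          intro e he
          apply hx e
          subst hv1e
          rw [List.append_assoc, getLast?_append_right _ _ (by simp),
            getLast?_append_right _ _ (by simp)] at he
          rw [List.append_assoc, getLast?_append_right _ _ (by simp),
            getLast?_append_right _ _ (by simp)]
          exact he
      refine EmpS.step (u ++ List.replicate b c ++ v1) d k y hk hx' hy ?_
      have := ih u c a b (v1 ++ y) (by simp [List.append_assoc]) ha hab
      simpa [List.append_assoc] using this

-- the context lemma: an emptiable segment between two blocks of c's can be dissolved
theorem empS_ctx : ∀ mid, EmpS mid → ∀ (c : Char) (a b : Nat) (w : List Char),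
    1 ≤ a → 1 ≤ b → EmpS (List.replicate (a + b) c ++ w) →
    EmpS (List.replicate a c ++ mid ++ List.replicate b c ++ w) := by
  intro mid hmid
  induction hmid with
  | nil =>
    intro c a b w ha hb hw
    simpa only [List.replicate_add, List.append_assoc, List.append_nil, List.nil_append] using hw
  | step x d k y hk hx hy h ih =>
    intro c a b w ha hb hw
    by_cases hxc : x = [] ∧ d = c
    · obtain ⟨rfl, rfl⟩ := hxc
      have hmono : EmpS ([] ++ List.replicate (a + k + b) d ++ w) :=
        empS_mono _ hw [] d (a + b) (a + k + b) w (by simp) (by omega) (by omega)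
      have hih := ih d (a + k) b w (by omega) hb (by simpa using hmono)
      simpa only [List.replicate_add, List.append_assoc, List.append_nil, List.nil_append] using hih
    · by_cases hyc : y = [] ∧ d = c
      · obtain ⟨rfl, rfl⟩ := hyc
        have hmono : EmpS ([] ++ List.replicate (a + (k + b)) d ++ w) :=
          empS_mono _ hw [] d (a + b) (a + (k + b)) w (by simp) (by omega) (by omega)
        have hih := ih d a (k + b) w ha (by omega) (by simpa using hmono)
        simpa only [List.replicate_add, List.append_assoc, List.append_nil, List.nil_append] using hih
      · have hX : NEW d (List.replicate a c ++ x) := by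
          cases hxe : x with
          | nil =>
            have hdc : d ≠ c := by
              rcases not_and_or.mp hxc with h1 | h2
              · exact absurd hxe h1
              · exact h2
            intro e he
            subst hxe
            simp only [List.append_nil] at he
            rw [getLast?_replicate_pos _ _ ha] at he
            injection he with he'
            subst he'
            exact fun h' => hdc h'.symm
          | cons z x' =>
            intro e he
            apply hx e
            subst hxe
            rw [getLast?_append_right _ _ (by simp)] at he
            exact he
        have hY : NSW d (y ++ List.replicate b c ++ w) := by
          cases hye : y with
          | nil =>
            have hdc : d ≠ c := by
              rcases not_and_or.mp hyc with h1 | h2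
              · exact absurd hye h1
              · exact h2
            intro e he
            subst hye
            simp only [List.nil_append] at he
            rw [head?_append_left _ _ (by simp; omega)] at he
            rw [head?_replicate_pos _ _ hb] at he
            injection he with he'
            subst he'
            exact fun h' => hdc h'.symm
          | cons z y' =>
            intro e he
            apply hy e
            subst hye
            simpa using he
        have hinner : EmpS ((List.replicate a c ++ x) ++ (y ++ List.replicate b c ++ w)) := by
          have := ih c a b w ha hb hw
          simpa [List.append_assoc] using this
        have := EmpS.step (List.replicate a c ++ x) d k (y ++ List.replicate b c ++ w)
          hk hX hY hinner
        simpa [List.append_assoc] using this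

-- ---------- small facts about NSW/NEW ----------

theorem nsw_nil (c : Char) : NSW c [] := by intro d h; simp at h

theorem new_nil (c : Char) : NEW c [] := by intro d h; simp at h

theorem nsw_append_left {c : Char} {A B : List Char} (hA : A ≠ []) (h : NSW c A) :
    NSW c (A ++ B) := by
  intro d hd
  rw [head?_append_left _ _ hA] at hd
  exact h d hd

theorem nsw_append' {c : Char} {A B : List Char} (hA : NSW c A) (hB : NSW c B) :
    NSW c (A ++ B) := by
  cases A with
  | nil => simpa using hB
  | cons a A' => exact nsw_append_left (by simp) hA

theorem new_append_right {c : Char} {A B : List Char} (hB : B ≠ []) (h : NEW c B) :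
    NEW c (A ++ B) := by
  intro d hd
  rw [getLast?_append_right _ _ hB] at hd
  exact h d hd

theorem nsw_of_append_left {c : Char} {A B : List Char} (h : NSW c (A ++ B)) : NSW c A := by
  cases A with
  | nil => exact nsw_nil c
  | cons a A' =>
    intro d hd
    simp only [List.head?_cons, Option.some.injEq] at hd
    exact hd ▸ h a (by simp)

theorem new_of_append_right {c : Char} {A B : List Char} (h : NEW c (A ++ B)) : NEW c B := by
  cases B with
  | nil => exact new_nil c
  | cons b B' =>
    intro d hd
    apply h d
    rw [getLast?_append_right _ _ (by simp)]
    exact hd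

-- same head, different tail
theorem nsw_append_head {c : Char} {A B C : List Char} (hA : A ≠ []) (h : NSW c (A ++ B)) :
    NSW c (A ++ C) := by
  cases A with
  | nil => simp at hA
  | cons a A' =>
    intro d hd
    simp only [List.cons_append, List.head?_cons, Option.some.injEq] at hd
    exact hd ▸ h a (by simp)

theorem nsw_replicate {c d : Char} {k : Nat} (h : d ≠ c) : NSW c (List.replicate k d) := by
  intro e he
  cases k with
  | zero => simp at he
  | succ k =>
    rw [head?_replicate_pos _ _ (by omega)] at he
    injection he with he'
    subst he'
    exact h

theorem new_replicate {c d : Char} {k : Nat} (h : d ≠ c) : NEW c (List.replicate k d) := by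
  intro e he
  cases k with
  | zero => simp at he
  | succ k =>
    rw [getLast?_replicate_pos _ _ (by omega)] at he
    injection he with he'
    subst he'
    exact h

theorem head_ne {c0 c : Char} {M : Nat} {z : List Char}
    (h : NSW c0 (List.replicate M c ++ z)) (hM : 1 ≤ M) : c ≠ c0 :=
  h c (by rw [head?_append_left _ _ (by simp; omega), head?_replicate_pos _ _ hM])

theorem last_ne {c0 c : Char} {M : Nat} {z : List Char}
    (h : NEW c0 (z ++ List.replicate M c)) (hM : 1 ≤ M) : c ≠ c0 :=
  h c (by rw [getLast?_append_right _ _ (by simp; omega), getLast?_replicate_pos _ _ hM])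

theorem rep_ne_nil {c : Char} {k : Nat} (h : 1 ≤ k) : List.replicate k c ≠ [] := by
  intro hcon
  have := congrArg List.length hcon
  simp at this
  omega

-- ---------- the interval DP as a predicate on strings ----------

-- DP none s: the DP says s can be emptied.  DP (some (c, N)) rest: the DP says
-- replicate N c ++ rest can be emptied (rest never starts with c).
inductive DP : Option (Char × Nat) → List Char → Prop
  | nil : DP none []
  | top (c : Char) (N : Nat) (rest : List Char) :
      1 ≤ N → NSW c rest → DP (some (c, N)) rest → DP none (List.replicate N c ++ rest)
  | base (c : Char) (N : Nat) (rest : List Char) :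
      2 ≤ N → NSW c rest → DP none rest → DP (some (c, N)) rest
  | split (c : Char) (N : Nat) (mid : List Char) (M : Nat) (rest2 : List Char) :
      1 ≤ N → mid ≠ [] → NSW c mid → NEW c mid → 1 ≤ M → NSW c rest2 →
      DP none mid → DP (some (c, N + M)) rest2 →
      DP (some (c, N)) (mid ++ List.replicate M c ++ rest2)

theorem dp_block (c : Char) (k : Nat) (hk : 2 ≤ k) : DP none (List.replicate k c) := by
  have := DP.top c k [] (by omega) (nsw_nil c) (DP.base c k [] hk (nsw_nil c) DP.nil)
  simpa using this

-- soundness of the DP against the game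
theorem dp_sound : ∀ o s, DP o s →
    (match o with
     | none => EmpS s
     | some (c, N) => EmpS (List.replicate N c ++ s)) := by
  intro o s h
  induction h with
  | nil => exact EmpS.nil
  | top c N rest hN hNSW hG ih => exact ih
  | base c N rest h2 hNSW hrest ih =>
    have := EmpS.step [] c N rest h2 (new_nil c) hNSW (by simpa using ih)
    simpa using this
  | split c N mid M rest2 hN hne hnswm hnewm hM hnsw2 hmid hG ihmid ihG =>
    have := empS_ctx mid ihmid c N M rest2 hN hM (by simpa using ihG)
    simpa only [List.append_assoc] using this

-- splitting a string equation against a replicate prefix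
theorem append_eq_replicate_append (x y z : List Char) (m : Nat) (d : Char)
    (h : x ++ y = List.replicate m d ++ z) :
    (x.length ≤ m ∧ x = List.replicate x.length d ∧
       y = List.replicate (m - x.length) d ++ z)
    ∨ (∃ x', x = List.replicate m d ++ x' ∧ z = x' ++ y) := by
  by_cases hlen : x.length ≤ m
  · left
    refine ⟨hlen, ?_, ?_⟩
    · have h1 : x = (x ++ y).take x.length := by simp
      rw [h, List.take_append, List.take_replicate, min_eq_left hlen] at h1
      have e0 : x.length - (List.replicate m d).length = 0 := by simp; omega
      rw [e0, List.take_zero, List.append_nil] at h1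
      exact h1
    · have h1 : y = (x ++ y).drop x.length := by simp
      rw [h, List.drop_append, List.drop_replicate] at h1
      have e0 : x.length - (List.replicate m d).length = 0 := by simp; omega
      rw [e0, List.drop_zero] at h1
      exact h1
  · right
    push_neg at hlen
    have h1 : List.replicate m d <+: x ++ y := ⟨z, h.symm⟩
    have h2 : x <+: x ++ y := ⟨y, rfl⟩
    obtain ⟨x', hx'⟩ := List.prefix_of_prefix_length_le h1 h2 (by simp; omega)
    refine ⟨x', hx'.symm, ?_⟩
    apply List.append_cancel_left (as := List.replicate m d)
    rw [← h, ← hx']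
    simp [List.append_assoc]

-- inserting a fresh maximal run of length ≥ 2 preserves the DP
theorem dp_insert (c0 : Char) (k : Nat) (hk : 2 ≤ k) :
    ∀ o s, DP o s → ∀ x y, s = x ++ y → NSW c0 y →
      (∀ c N, o = some (c, N) → NEW c0 (List.replicate N c ++ x)) →
      (o = none → NEW c0 x) →
      DP o (x ++ List.replicate k c0 ++ y) := by
  intro o s h
  induction h with
  | nil =>
    intro x y heq hy _ _
    obtain ⟨rfl, rfl⟩ := List.append_eq_nil_iff.mp heq.symm
    simpa using dp_block c0 k hk
  | top c N rest hN hNSW hG ih =>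
    intro x y heq hy hsome hnone
    have hnewx : NEW c0 x := hnone rfl
    rcases append_eq_replicate_append x y rest N c heq.symm with
      ⟨hlen, hxrep, hyrep⟩ | ⟨x', hxrep, hrest⟩
    · by_cases hj0 : x.length = 0
      · have hx0 : x = [] := List.eq_nil_of_length_eq_zero hj0
        subst hx0
        simp only [List.length_nil, Nat.sub_zero] at hyrep
        subst hyrep
        have hcc0 : c ≠ c0 := head_ne hy hN
        have hDs : DP none (List.replicate N c ++ rest) := DP.top c N rest hN hNSW hG
        have := DP.top c0 k (List.replicate N c ++ rest) (by omega) hy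
          (DP.base c0 k _ hk hy hDs)
        simpa using this
      · by_cases hjN : x.length = N
        · have hxrep' : x = List.replicate N c := by rw [hxrep, hjN]
          have hyrep' : y = rest := by rw [hyrep, hjN]; simp
          have hcc0 : c ≠ c0 := last_ne (z := []) (by simpa [hxrep'] using hnewx) hN
          have hGnew : DP (some (c, N)) ([] ++ List.replicate k c0 ++ rest) := by
            apply ih [] rest (by simp) (by rw [← hyrep']; exact hy)
            · intro c' N' hEq
              cases hEq
              simpa using new_replicate (k := N) hcc0
            · intro hcon; cases hcon
          have := DP.top c N (List.replicate k c0 ++ rest) hN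
            (nsw_append' (nsw_replicate (Ne.symm hcc0)) hNSW) (by simpa using hGnew)
          rw [hxrep', hyrep']
          simpa only [List.append_assoc] using this
        · -- 1 ≤ x.length < N : the insertion splits the leading block
          have hj1 : 1 ≤ x.length := by omega
          have hjlt : x.length < N := by omega
          have hcc0 : c ≠ c0 := last_ne (z := []) (M := x.length)
            (by rw [List.nil_append, ← hxrep]; exact hnewx) hj1
          have hinner : DP (some (c, x.length)) (List.replicate k c0 ++
              List.replicate (N - x.length) c ++ rest) := by
            have hGN : DP (some (c, x.length + (N - x.length))) rest := by
              rw [show x.length + (N - x.length) = N by omega]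
              exact hG
            have := DP.split c x.length (List.replicate k c0) (N - x.length) rest
              hj1 (rep_ne_nil (by omega)) (nsw_replicate (Ne.symm hcc0))
              (new_replicate (Ne.symm hcc0)) (by omega) hNSW
              (dp_block c0 k hk) hGN
            simpa only [List.append_assoc] using this
          have := DP.top c x.length (List.replicate k c0 ++
              List.replicate (N - x.length) c ++ rest) hj1
            (nsw_append_left (List.append_ne_nil_of_left_ne_nil (rep_ne_nil (by omega)) _)
              (nsw_append_left (rep_ne_nil (by omega)) (nsw_replicate (Ne.symm hcc0))))
            hinner
          rw [hxrep, hyrep]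
          simpa only [List.append_assoc] using this
    · -- the insertion lies inside rest
      subst hxrep
      have hcont : DP (some (c, N)) (x' ++ List.replicate k c0 ++ y) := by
        apply ih x' y hrest hy
        · intro c' N' hEq
          cases hEq
          simpa only [List.append_assoc] using hnewx
        · intro hcon; cases hcon
      have hNSW' : NSW c (x' ++ List.replicate k c0 ++ y) := by
        cases hx'e : x' with
        | nil =>
          have hcc0 : c ≠ c0 := last_ne (z := []) (by simpa [hx'e] using hnewx) hN
          subst hx'e
          simpa using nsw_append' (nsw_replicate (Ne.symm hcc0))
            (by have h9 : rest = y := by simpa using hrest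
                exact h9 ▸ hNSW)
        | cons a A' =>
          subst hx'e
          have h1 : NSW c ((a :: A') ++ y) := by rw [← hrest]; exact hNSW
          have h2 := nsw_append_head (A := a :: A') (B := y)
            (C := List.replicate k c0 ++ y) (by simp) h1
          simpa only [List.append_assoc] using h2
      have := DP.top c N (x' ++ List.replicate k c0 ++ y) hN hNSW' hcont
      simpa only [List.append_assoc] using this
  | base c N rest h2 hNSW hrest ihrest =>
    intro x y heq hy hsome _
    have hypN := hsome c N rfl
    refine DP.base c N (x ++ List.replicate k c0 ++ y) h2 ?_ ?_
    · cases hxe : x with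
      | nil =>
        have hcc0 : c ≠ c0 := last_ne (z := []) (by simpa [hxe] using hypN) (by omega)
        subst hxe
        simpa using nsw_append' (nsw_replicate (Ne.symm hcc0)) (by
          have h9 : rest = y := by simpa using heq
          exact h9 ▸ hNSW)
      | cons a A' =>
        subst hxe
        have h1 : NSW c ((a :: A') ++ y) := by rw [← heq]; exact hNSW
        have h2 := nsw_append_head (A := a :: A') (B := y)
          (C := List.replicate k c0 ++ y) (by simp) h1
        simpa only [List.append_assoc] using h2
    · exact ihrest x y heq hy (fun _ _ h => by cases h)
        (fun _ => new_of_append_right hypN)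
  | split c N mid M rest2 hN hne hnswm hnewm hM hnsw2 hmid hG ihmid ihG =>
    intro x y heq hy hsome _
    have hypN := hsome c N rfl
    have heq' : mid ++ (List.replicate M c ++ rest2) = x ++ y := by
      simpa only [List.append_assoc] using heq
    rcases List.append_eq_append_iff.mp heq' with ⟨a', hx1, hy1⟩ | ⟨y1, hmid1, hy1⟩
    · -- x = mid ++ a' : the insertion is at or right of the block
      subst hx1
      rcases append_eq_replicate_append a' y rest2 M c hy1.symm with
        ⟨hlen, harep, hyrep⟩ | ⟨x'', hx''rep, hrest2⟩
      · by_cases hj0 : a'.length = 0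
        · -- insertion immediately after mid
          have ha0 : a' = [] := List.eq_nil_of_length_eq_zero hj0
          subst ha0
          simp only [List.length_nil, Nat.sub_zero] at hyrep
          subst hyrep
          have hcc0 : c ≠ c0 := head_ne hy hM
          have hmid' : DP none (mid ++ List.replicate k c0) := by
            have := ihmid mid [] (by simp) (nsw_nil c0) (fun _ _ h => by cases h)
              (fun _ => by
                have h1 := new_of_append_right hypN
                simpa using h1)
            simpa using this
          have := DP.split c N (mid ++ List.replicate k c0) M rest2 hN
            (by intro hcon; have := congrArg List.length hcon; simp at this; omega)
            (nsw_append_left hne hnswm)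
            (new_append_right (rep_ne_nil (by omega)) (new_replicate (Ne.symm hcc0)))
            hM hnsw2 hmid' hG
          simpa only [List.append_assoc, List.append_nil] using this
        · by_cases hjM : a'.length = M
          · -- insertion immediately after the block
            have harep' : a' = List.replicate M c := by rw [harep, hjM]
            have hyrep' : y = rest2 := by rw [hyrep, hjM]; simp
            have hcc0 : c ≠ c0 := by
              refine last_ne (z := List.replicate N c ++ mid) (M := M) ?_ hM
              have hsh : List.replicate N c ++ (mid ++ a') =
                  (List.replicate N c ++ mid) ++ List.replicate M c := by
                rw [harep']; simp [List.append_assoc]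
              exact hsh ▸ hypN
            have hGnew : DP (some (c, N + M)) ([] ++ List.replicate k c0 ++ rest2) := by
              apply ihG [] rest2 (by simpa using hyrep')
              · rw [← hyrep']; exact hy
              · intro c' N' hEq
                cases hEq
                simpa using new_replicate (k := N + M) hcc0
              · intro hcon; cases hcon
            have := DP.split c N mid M (List.replicate k c0 ++ rest2) hN hne hnswm hnewm hM
              (nsw_append' (nsw_replicate (Ne.symm hcc0)) hnsw2) hmid
              (by simpa using hGnew)
            rw [harep', hyrep']
            simpa only [List.append_assoc] using this
          · -- the insertion splits the block
            have hj1 : 1 ≤ a'.length := by omega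
            have hjlt : a'.length < M := by omega
            have hcc0 : c ≠ c0 := by
              refine head_ne (z := rest2) (M := M - a'.length) ?_ (by omega)
              exact hyrep ▸ hy
            have hinner : DP (some (c, N + a'.length)) (List.replicate k c0 ++
                List.replicate (M - a'.length) c ++ rest2) := by
              have hGN : DP (some (c, N + a'.length + (M - a'.length))) rest2 := by
                rw [show N + a'.length + (M - a'.length) = N + M by omega]
                exact hG
              have := DP.split c (N + a'.length) (List.replicate k c0) (M - a'.length) rest2
                (by omega) (rep_ne_nil (by omega)) (nsw_replicate (Ne.symm hcc0))
                (new_replicate (Ne.symm hcc0)) (by omega) hnsw2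
                (dp_block c0 k hk) hGN
              simpa only [List.append_assoc] using this
            have := DP.split c N mid a'.length (List.replicate k c0 ++
                List.replicate (M - a'.length) c ++ rest2) hN hne hnswm hnewm hj1
              (nsw_append_left (List.append_ne_nil_of_left_ne_nil (rep_ne_nil (by omega)) _)
                (nsw_append_left (rep_ne_nil (by omega)) (nsw_replicate (Ne.symm hcc0))))
              hmid hinner
            rw [harep, hyrep]
            simpa only [List.append_assoc] using this
      · -- the insertion lies inside rest2
        subst hx''rep
        have hlastc : x'' = [] → c ≠ c0 := by
          intro hx''e
          refine last_ne (z := List.replicate N c ++ mid) (M := M) ?_ hM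
          have hsh : List.replicate N c ++ (mid ++ (List.replicate M c ++ x'')) =
              (List.replicate N c ++ mid) ++ List.replicate M c := by
            rw [hx''e]; simp [List.append_assoc]
          exact hsh ▸ hypN
        have hcont : DP (some (c, N + M)) (x'' ++ List.replicate k c0 ++ y) := by
          apply ihG x'' y hrest2 hy
          · intro c' N' hEq
            cases hEq
            cases hx''e : x'' with
            | nil =>
              subst hx''e
              simpa using new_replicate (k := N + M) (hlastc rfl)
            | cons a A' =>
              subst hx''e
              refine new_append_right (by simp) ?_
              have h1 := new_of_append_right hypN
              have h2 := new_of_append_right h1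
              exact new_of_append_right h2
          · intro hcon; cases hcon
        have hNSW' : NSW c (x'' ++ List.replicate k c0 ++ y) := by
          cases hx''e : x'' with
          | nil =>
            subst hx''e
            simpa using nsw_append' (nsw_replicate (Ne.symm (hlastc rfl)))
              (by have h9 : rest2 = y := by simpa using hrest2
                  exact h9 ▸ hnsw2)
          | cons a A' =>
            subst hx''e
            have h1 : NSW c ((a :: A') ++ y) := by rw [← hrest2]; exact hnsw2
            have h2 := nsw_append_head (A := a :: A') (B := y)
              (C := List.replicate k c0 ++ y) (by simp) h1
            simpa only [List.append_assoc] using h2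
        have := DP.split c N mid M (x'' ++ List.replicate k c0 ++ y) hN hne hnswm hnewm hM
          hNSW' hmid hcont
        simpa only [List.append_assoc] using this
    · -- the insertion lies inside mid
      subst hmid1
      subst hy1
      have hmidne : (x ++ List.replicate k c0 ++ y1) ≠ [] := by
        intro hcon; have := congrArg List.length hcon; simp at this; omega
      have hnswm' : NSW c (x ++ List.replicate k c0 ++ y1) := by
        cases hxe : x with
        | nil =>
          have hcc0 : c ≠ c0 := last_ne (z := []) (by simpa [hxe] using hypN) hN
          subst hxe
          simpa using nsw_append' (nsw_replicate (Ne.symm hcc0))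
            (by simpa using hnswm)
        | cons a A' =>
          subst hxe
          have h2 := nsw_append_head (A := a :: A') (B := y1)
            (C := List.replicate k c0 ++ y1) (by simp) hnswm
          simpa only [List.append_assoc] using h2
      have hnewm' : NEW c (x ++ List.replicate k c0 ++ y1) := by
        cases hy1e : y1 with
        | nil =>
          have hcc0 : c ≠ c0 := head_ne (z := rest2) (M := M)
            (by rw [hy1e] at hy; simpa using hy) hM
          subst hy1e
          simpa only [List.append_assoc, List.append_nil] using
            new_append_right (A := x) (B := List.replicate k c0) (rep_ne_nil (by omega))
              (new_replicate (Ne.symm hcc0))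
        | cons a A' =>
          subst hy1e
          exact new_append_right (by simp) (new_of_append_right hnewm)
      have hmid' : DP none (x ++ List.replicate k c0 ++ y1) := by
        apply ihmid x y1 rfl (nsw_of_append_left (by simpa only [List.append_assoc] using hy))
          (fun _ _ h => by cases h)
          (fun _ => new_of_append_right hypN)
      have := DP.split c N (x ++ List.replicate k c0 ++ y1) M rest2 hN hmidne hnswm' hnewm'
        hM hnsw2 hmid' hG
      simpa only [List.append_assoc] using this

-- completeness of the DP against the game
theorem empS_dp : ∀ s, EmpS s → DP none s := by
  intro s h
  induction h with
  | nil => exact DP.nil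
  | step x c k y hk hx hy h ih =>
    exact dp_insert c k hk none (x ++ y) ih x y rfl hy
      (fun _ _ hcon => by cases hcon) (fun _ => hx)

-- ---------- bridge: A's search on run lists computes EmpS ----------

theorem decode_cons (d : Char) (m : Nat) (r : List (Char × Nat)) :
    decodeR ((d, m) :: r) = List.replicate m d ++ decodeR r := by simp [decodeR]

theorem decode_ne_nil (rs : List (Char × Nat)) (hcnt : ∀ p ∈ rs, 1 ≤ p.2) (h : rs ≠ []) :
    decodeR rs ≠ [] := by
  cases rs with
  | nil => simp at h
  | cons p r =>
    obtain ⟨d, m⟩ := p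
    rw [decode_cons]
    exact List.append_ne_nil_of_left_ne_nil (rep_ne_nil (hcnt (d, m) (by simp))) _

theorem decode_head_nsw (c : Char) (r : List (Char × Nat))
    (hcnt : ∀ p ∈ r, 1 ≤ p.2) (hhd : ∀ p, r.head? = some p → p.1 ≠ c) :
    NSW c (decodeR r) := by
  cases r with
  | nil => exact nsw_nil c
  | cons p r' =>
    obtain ⟨d, m⟩ := p
    rw [decode_cons]
    exact nsw_append_left (rep_ne_nil (hcnt (d, m) (by simp)))
      (nsw_replicate (hhd (d, m) rfl))

theorem decode_last_new (c : Char) (l : List (Char × Nat))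
    (hcnt : ∀ p ∈ l, 1 ≤ p.2) (hlast : ∀ p, l.getLast? = some p → p.1 ≠ c) :
    NEW c (decodeR l) := by
  rcases List.eq_nil_or_concat l with rfl | ⟨l', q, rfl⟩
  · exact new_nil c
  · obtain ⟨d, m⟩ := q
    rw [List.concat_eq_append, decodeR_append]
    have hd : d ≠ c := hlast (d, m) (by rw [List.concat_eq_append]; exact List.getLast?_concat)
    have hm : 1 ≤ m := hcnt (d, m) (by simp)
    have hdec : decodeR [(d, m)] = List.replicate m d := by simp [decodeR]
    rw [hdec]
    exact new_append_right (rep_ne_nil hm) (new_replicate hd)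

theorem wf_mid_facts (l r : List (Char × Nat)) (p : Char × Nat)
    (hWF : WFruns (l ++ p :: r)) :
    NEW p.1 (decodeR l) ∧ NSW p.1 (decodeR r) ∧ 1 ≤ p.2 := by
  obtain ⟨hcnt, hch⟩ := hWF
  rw [List.isChain_append] at hch
  obtain ⟨hchl, hchpr, hbd⟩ := hch
  rw [List.isChain_cons] at hchpr
  refine ⟨?_, ?_, hcnt p (by simp)⟩
  · exact decode_last_new _ l (fun q hq => hcnt q (by simp [hq]))
      (fun q hq => hbd q (by simp [hq]) p (by simp))
  · exact decode_head_nsw _ r (fun q hq => hcnt q (by simp [hq]))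
      (fun q hq => Ne.symm (hchpr.1 q (by simp [hq])))

-- a run-headed decomposition of a string is unique
theorem run_decomp_unique {c c' : Char} {n n' : Nat} {rest rest' : List Char}
    (h : List.replicate n c ++ rest = List.replicate n' c' ++ rest')
    (hn : 1 ≤ n) (hn' : 1 ≤ n') (hr : NSW c rest) (hr' : NSW c' rest') :
    c = c' ∧ n = n' ∧ rest = rest' := by
  have hcc : c = c' := by
    have h1 := congrArg List.head? h
    rw [head?_append_left _ _ (rep_ne_nil hn), head?_append_left _ _ (rep_ne_nil hn'),
      head?_replicate_pos _ _ hn, head?_replicate_pos _ _ hn'] at h1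
    exact Option.some.inj h1
  subst hcc
  rcases append_eq_replicate_append (List.replicate n c) rest rest' n' c h with
    ⟨hlen, _, hrest⟩ | ⟨x', hxrep, hrest⟩
  · simp only [List.length_replicate] at hlen hrest
    by_cases hlt : n < n'
    · exfalso
      refine hr c ?_ rfl
      rw [hrest, head?_append_left _ _ (rep_ne_nil (by omega)),
        head?_replicate_pos _ _ (by omega)]
    · have hnn : n = n' := by omega
      subst hnn
      refine ⟨rfl, rfl, ?_⟩
      simpa using hrest
  · have hlen := congrArg List.length hxrep
    simp only [List.length_replicate, List.length_append] at hlen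
    have hx' : x' = List.replicate (n - n') c := by
      have hdrop : x' = (List.replicate n c).drop n' := by
        rw [hxrep, List.drop_left' (by simp)]
      rw [hdrop, List.drop_replicate]
    by_cases hlt : n' < n
    · exfalso
      refine hr' c ?_ rfl
      rw [hrest, hx', head?_append_left _ _ (rep_ne_nil (by omega)),
        head?_replicate_pos _ _ (by omega)]
    · have hnn : n = n' := by omega
      subst hnn
      refine ⟨rfl, rfl, ?_⟩
      rw [hx', Nat.sub_self] at hrest
      simpa using hrest.symm

theorem pvCanR_succ' (f : Nat) (rs : List (Char × Nat)) (h : rs ≠ []) :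
    pvCanR (f + 1) rs = (List.range rs.length).any fun t =>
      decide (2 ≤ (rs.getD t (' ', 0)).2) && pvCanR f (pvRemoveMergeAt rs t) := by
  cases rs with
  | nil => simp at h
  | cons p rs' => rfl

theorem canR_empS : ∀ fuel rs, WFruns rs → rs.length ≤ fuel →
    pvCanR fuel rs = true → EmpS (decodeR rs) := by
  intro fuel
  induction fuel with
  | zero =>
    intro rs hWF hlen h
    cases rs with
    | nil => simpa [decodeR] using EmpS.nil
    | cons p rs' => simp at hlen
  | succ f ih =>
    intro rs hWF hlen h
    cases rs with
    | nil => simpa [decodeR] using EmpS.nil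
    | cons p rs' =>
      rw [pvCanR_succ' f _ (by simp)] at h
      obtain ⟨t, htm, hcond⟩ := List.any_eq_true.mp h
      have ht : t < (p :: rs').length := List.mem_range.mp htm
      simp only [Bool.and_eq_true, decide_eq_true_eq] at hcond
      obtain ⟨h2b, hrec⟩ := hcond
      have hsp : p :: rs' = (p :: rs').take t ++ (p :: rs')[t] :: (p :: rs').drop (t + 1) := by
        rw [← List.drop_eq_getElem_cons ht, List.take_append_drop]
      have hltk : ((p :: rs').take t).length = t := by
        rw [List.length_take, List.length_cons]
        have ht' := ht
        rw [List.length_cons] at ht'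
        omega
      have hWF' : WFruns ((p :: rs').take t ++ (p :: rs')[t] :: (p :: rs').drop (t + 1)) := by
        rw [← hsp]; exact hWF
      obtain ⟨hdecS, hwfS, htlS, hlenS⟩ := pvRemoveMergeAt_spec _ _ _ hWF'
      have hrm : pvRemoveMergeAt (p :: rs') t =
          pvRemoveMergeAt ((p :: rs').take t ++ (p :: rs')[t] :: (p :: rs').drop (t + 1))
            (((p :: rs').take t).length) := by
        rw [hltk, ← hsp]
      have hlen2 : (pvRemoveMergeAt ((p :: rs').take t ++ (p :: rs')[t] ::
          (p :: rs').drop (t + 1)) (((p :: rs').take t).length)).length ≤ f := by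
        refine le_trans hlenS ?_
        rw [hltk]
        have hdl : ((p :: rs').drop (t + 1)).length = (p :: rs').length - (t + 1) := by simp
        omega
      have hE := ih _ hwfS hlen2 (by rw [← hrm]; exact hrec)
      rw [hdecS] at hE
      obtain ⟨hnew, hnsw, hcnt1⟩ := wf_mid_facts _ _ _ hWF'
      have h2 : 2 ≤ ((p :: rs')[t]).2 := by
        rw [List.getD_eq_getElem _ _ ht] at h2b
        exact h2b
      have hstep := EmpS.step (decodeR ((p :: rs').take t)) ((p :: rs')[t]).1 ((p :: rs')[t]).2
        (decodeR ((p :: rs').drop (t + 1))) h2 hnew hnsw hE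
      have hdec : decodeR (p :: rs') = decodeR ((p :: rs').take t) ++
          List.replicate ((p :: rs')[t]).2 ((p :: rs')[t]).1 ++
          decodeR ((p :: rs').drop (t + 1)) := by
        conv_lhs => rw [hsp]
        rw [decodeR_append]
        have : decodeR ((p :: rs')[t] :: (p :: rs').drop (t + 1)) =
            List.replicate ((p :: rs')[t]).2 ((p :: rs')[t]).1 ++
            decodeR ((p :: rs').drop (t + 1)) := by
          rw [show (p :: rs')[t] = (((p :: rs')[t]).1, ((p :: rs')[t]).2) from rfl, decode_cons]
        rw [this, List.append_assoc]
      rw [hdec]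
      simpa only [List.append_assoc] using hstep

-- locating a maximal run inside a well-formed run list
theorem runLoc : ∀ (rs : List (Char × Nat)) (x : List Char) (c : Char) (k : Nat) (y : List Char),
    WFruns rs → decodeR rs = x ++ List.replicate k c ++ y → 1 ≤ k → NEW c x → NSW c y →
    ∃ l r, rs = l ++ (c, k) :: r ∧ x = decodeR l ∧ y = decodeR r := by
  intro rs
  induction rs with
  | nil =>
    intro x c k y _ heq hk _ _
    exfalso
    have := congrArg List.length heq
    simp [decodeR] at this
    omega
  | cons p rs' ih =>
    intro x c k y hWF heq hk hx hy
    obtain ⟨d, m⟩ := p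
    have hm : 1 ≤ m := hWF.1 (d, m) (by simp)
    have hWF' : WFruns rs' := (wf_sub_append [(d, m)] rs' (by simpa using hWF)).2
    have hnswd : NSW d (decodeR rs') := by
      apply decode_head_nsw
      · exact fun q hq => hWF.1 q (by simp [hq])
      · intro q hq
        have hch := hWF.2
        rw [List.isChain_cons] at hch
        exact Ne.symm (hch.1 q (by simp [hq]))
    rw [decode_cons] at heq
    rcases append_eq_replicate_append x (List.replicate k c ++ y) (decodeR rs') m d
      (by simpa only [List.append_assoc] using heq.symm) with
      ⟨hlen, hxrep, hrest⟩ | ⟨x', hxrep, hdec'⟩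
    · by_cases hj0 : x.length = 0
      · have hx0 : x = [] := List.eq_nil_of_length_eq_zero hj0
        subst hx0
        simp only [List.length_nil, Nat.sub_zero] at hrest
        obtain ⟨hcd, hkm, hyd⟩ := run_decomp_unique hrest hk hm hy hnswd
        subst hcd; subst hkm
        exact ⟨[], rs', rfl, rfl, hyd⟩
      · by_cases hjm : x.length = m
        · rw [hjm] at hrest hxrep
          simp only [Nat.sub_self, List.replicate_zero, List.nil_append] at hrest
          obtain ⟨l', r, hsp, hxd, hyd⟩ := ih [] c k y hWF'
            (by rw [hrest.symm]; simp) hk (new_nil c) hy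
          refine ⟨(d, m) :: l', r, by rw [hsp]; rfl, ?_, hyd⟩
          rw [decode_cons, ← hxd, hxrep]
          simp
        · exfalso
          have hlt : x.length < m := by omega
          have hcd : c = d := by
            have h1 := congrArg List.head? hrest
            rw [head?_append_left _ _ (rep_ne_nil hk), head?_append_left _ _ (rep_ne_nil (by omega)),
              head?_replicate_pos _ _ hk, head?_replicate_pos _ _ (by omega)] at h1
            exact Option.some.inj h1
          refine hx c ?_ rfl
          rw [hxrep, getLast?_replicate_pos _ _ (by omega), hcd]
    · have hnew' : NEW c x' := new_of_append_right (hxrep ▸ hx)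
      obtain ⟨l', r, hsp, hxd, hyd⟩ := ih x' c k y hWF'
        (by simpa only [List.append_assoc] using hdec') hk hnew' hy
      refine ⟨(d, m) :: l', r, by rw [hsp]; rfl, ?_, hyd⟩
      rw [decode_cons, ← hxd, hxrep]

theorem empS_canR : ∀ s, EmpS s → ∀ rs fuel, WFruns rs → rs.length ≤ fuel →
    decodeR rs = s → pvCanR fuel rs = true := by
  intro s h
  induction h with
  | nil =>
    intro rs fuel hWF hlen hdec
    cases rs with
    | nil => cases fuel <;> rfl
    | cons p rs' =>
      exfalso
      obtain ⟨d, m⟩ := p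
      have hm : 1 ≤ m := hWF.1 (d, m) (by simp)
      have h1 := congrArg List.length hdec
      rw [decode_cons] at h1
      simp at h1
      omega
  | step x c k y hk hx hy hemp ih =>
    intro rs fuel hWF hlen hdec
    obtain ⟨l, r, rfl, hxl, hyr⟩ := runLoc rs x c k y hWF hdec (by omega) hx hy
    have hlength : (l ++ (c, k) :: r).length = l.length + 1 + r.length := by simp; omega
    obtain ⟨f, rfl⟩ : ∃ f, fuel = f + 1 := ⟨fuel - 1, by omega⟩
    rw [pvCanR_succ' f _ (by simp)]
    apply List.any_eq_true.mpr
    refine ⟨l.length, List.mem_range.mpr (by simp), ?_⟩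
    obtain ⟨hdecS, hwfS, htlS, hlenS⟩ := pvRemoveMergeAt_spec l r (c, k) hWF
    have hgd : (l ++ (c, k) :: r).getD l.length (' ', 0) = (c, k) := by
      rw [List.getD_eq_getElem _ _ (by simp),
        List.getElem_append_right (le_refl _)]
      simp
    rw [hgd]
    simp only [Bool.and_eq_true, decide_eq_true_eq]
    refine ⟨by omega, ?_⟩
    apply ih _ f hwfS (by omega)
    rw [hdecS, ← hxl, ← hyr]

-- ---------- bridge: B's interval DP computes the DP predicate ----------

def sliceR (rs : List (Char × Nat)) (i j : Nat) : List (Char × Nat) := (rs.drop i).take (j - i)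

theorem sliceR_self (rs : List (Char × Nat)) : sliceR rs 0 rs.length = rs := by
  simp [sliceR]

theorem sliceR_nil (rs : List (Char × Nat)) (i : Nat) : sliceR rs i i = [] := by
  simp [sliceR]

theorem sliceR_len (rs : List (Char × Nat)) (i j : Nat) (hij : i ≤ j) (hj : j ≤ rs.length) :
    (sliceR rs i j).length = j - i := by
  simp [sliceR]
  omega

theorem sliceR_wf (rs : List (Char × Nat)) (i j : Nat) (hWF : WFruns rs) :
    WFruns (sliceR rs i j) := by
  have h1 : WFruns (rs.drop i) :=
    (wf_sub_append (rs.take i) (rs.drop i) (by rw [List.take_append_drop]; exact hWF)).2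
  exact (wf_sub_append ((rs.drop i).take (j - i)) ((rs.drop i).drop (j - i))
    (by rw [List.take_append_drop]; exact h1)).1

theorem sliceR_cons (rs : List (Char × Nat)) (i j : Nat) (hij : i < j) (hj : j ≤ rs.length) :
    sliceR rs i j = rs[i]'(by omega) :: sliceR rs (i + 1) j := by
  unfold sliceR
  rw [List.drop_eq_getElem_cons (by omega), show j - i = (j - (i + 1)) + 1 by omega,
    List.take_succ_cons]

theorem sliceR_split (rs : List (Char × Nat)) (i u j : Nat) (hiu : i ≤ u) (huj : u < j)
    (hj : j ≤ rs.length) :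
    sliceR rs i j = sliceR rs i u ++ rs[u]'(by omega) :: sliceR rs (u + 1) j := by
  unfold sliceR
  rw [show j - i = (u - i) + (j - u) by omega, List.take_add]
  congr 1
  rw [List.drop_drop, show i + (u - i) = u by omega,
    List.drop_eq_getElem_cons (by omega), show j - u = (j - (u + 1)) + 1 by omega,
    List.take_succ_cons]

theorem sliceR_decomp (rs : List (Char × Nat)) (i j : Nat) (l r : List (Char × Nat))
    (p : Char × Nat) (hij : i ≤ j) (hj : j ≤ rs.length)
    (hsp : sliceR rs i j = l ++ p :: r) :
    i + l.length < j ∧ rs.getD (i + l.length) (' ', 0) = p ∧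
    sliceR rs i (i + l.length) = l ∧ sliceR rs (i + l.length + 1) j = r := by
  have hlen : (sliceR rs i j).length = j - i := sliceR_len rs i j hij hj
  have hlen2 : j - i = l.length + 1 + r.length := by
    rw [hsp] at hlen
    simp at hlen
    omega
  have hu : i + l.length < j := by omega
  have hsp2 := sliceR_split rs i (i + l.length) j (by omega) hu hj
  rw [hsp] at hsp2
  have hlenA : (sliceR rs i (i + l.length)).length = l.length := by
    rw [sliceR_len rs i (i + l.length) (by omega) (by omega)]
    omega
  obtain ⟨hAeq, hBeq⟩ := List.append_inj hsp2 hlenA.symm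
  injection hBeq with hpq hreq
  refine ⟨hu, ?_, hAeq.symm, hreq.symm⟩
  rw [List.getD_eq_getElem _ _ (by omega)]
  exact hpq.symm

theorem pvLoopT_iff (rs : List (Char × Nat)) (i j k : Nat) :
    ∀ (d t : Nat), j - t = d → i + 2 ≤ t →
      (pvLoopT rs i j k t = true ↔ ∃ u, t ≤ u ∧ u < j ∧
        ((rs.getD u (' ', 0)).1 == (rs.getD i (' ', 0)).1 && pvE rs (i + 1) u
          && pvG rs u j ((rs.getD i (' ', 0)).2 + k)) = true) := by
  intro d
  induction d using Nat.strong_induction_on with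
  | _ d IH =>
  intro t hd ht
  rw [pvLoopT.eq_def]
  by_cases hg : i + 2 ≤ t ∧ t < j
  · rw [dif_pos hg, Bool.or_eq_true]
    constructor
    · rintro (hb | hrec)
      · exact ⟨t, le_refl t, hg.2, hb⟩
      · obtain ⟨u, hu1, hu2, hu3⟩ := (IH (j - (t + 1)) (by omega) (t + 1) rfl (by omega)).mp hrec
        exact ⟨u, by omega, hu2, hu3⟩
    · rintro ⟨u, hu1, hu2, hu3⟩
      by_cases hut : u = t
      · exact Or.inl (hut ▸ hu3)
      · exact Or.inr ((IH (j - (t + 1)) (by omega) (t + 1) rfl (by omega)).mpr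
          ⟨u, by omega, hu2, hu3⟩)
  · rw [dif_neg hg]
    constructor
    · intro hcon
      exact absurd hcon (by simp)
    · rintro ⟨u, hu1, hu2, _⟩
      exact absurd ⟨ht, by omega⟩ hg

theorem dp_some_inv {c : Char} {N : Nat} {rest : List Char} (h : DP (some (c, N)) rest) :
    (2 ≤ N ∧ NSW c rest ∧ DP none rest) ∨
    (∃ mid M rest2, rest = mid ++ List.replicate M c ++ rest2 ∧ 1 ≤ N ∧ mid ≠ [] ∧
      NSW c mid ∧ NEW c mid ∧ 1 ≤ M ∧ NSW c rest2 ∧ DP none mid ∧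
      DP (some (c, N + M)) rest2) := by
  cases h with
  | base _ _ _ h2 hnsw hrest => exact Or.inl ⟨h2, hnsw, hrest⟩
  | split _ _ mid M rest2 hN hne hnswm hnewm hM hnswr2 hmid hG =>
    exact Or.inr ⟨mid, M, rest2, rfl, hN, hne, hnswm, hnewm, hM, hnswr2, hmid, hG⟩

theorem dp_none_inv {s : List Char} (h : DP none s) :
    s = [] ∨ ∃ c N rest, s = List.replicate N c ++ rest ∧ 1 ≤ N ∧ NSW c rest ∧
      DP (some (c, N)) rest := by
  cases h with
  | nil => exact Or.inl rfl
  | top c N rest hN hnsw hG => exact Or.inr ⟨c, N, rest, rfl, hN, hnsw, hG⟩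

-- the port computes exactly the DP predicate on the decoded slices
theorem portDP : ∀ (d : Nat) (rs : List (Char × Nat)), WFruns rs → ∀ i j, j ≤ rs.length →
    j - i = d →
    ((i < j → ∀ k, (pvG rs i j k = true ↔
        DP (some ((rs.getD i (' ', 0)).1, (rs.getD i (' ', 0)).2 + k))
          (decodeR (sliceR rs (i + 1) j)))) ∧
     (i ≤ j → (pvE rs i j = true ↔ DP none (decodeR (sliceR rs i j))))) := by
  intro d
  induction d using Nat.strong_induction_on with
  | _ d IH =>
  intro rs hWF i j hj hd
  have hGpart : i < j → ∀ k, (pvG rs i j k = true ↔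
      DP (some ((rs.getD i (' ', 0)).1, (rs.getD i (' ', 0)).2 + k))
        (decodeR (sliceR rs (i + 1) j))) := by
    intro hlt k
    have hiLen : i < rs.length := by omega
    have hgi : rs.getD i (' ', 0) = rs[i] := List.getD_eq_getElem _ _ hiLen
    have hsl : sliceR rs i j = rs[i] :: sliceR rs (i + 1) j := sliceR_cons rs i j hlt hj
    have hwfsl : WFruns ([] ++ rs[i] :: sliceR rs (i + 1) j) := by
      rw [List.nil_append, ← hsl]
      exact sliceR_wf rs i j hWF
    obtain ⟨-, hnswR, hn1⟩ := wf_mid_facts [] (sliceR rs (i + 1) j) rs[i] hwfsl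
    rw [pvG.eq_def, dif_pos hlt, Bool.or_eq_true, Bool.and_eq_true, decide_eq_true_iff,
      pvLoopT_iff rs i j k (j - (i + 2)) (i + 2) rfl (le_refl _)]
    constructor
    · rintro (⟨h2, hE⟩ | ⟨u, hu1, hu2, hcond⟩)
      · have hEiff := ((IH (j - (i + 1)) (by omega) rs hWF (i + 1) j hj rfl).2 (by omega))
        refine DP.base _ _ _ h2 ?_ (hEiff.mp hE)
        rw [hgi]
        exact hnswR
      · simp only [Bool.and_eq_true, beq_iff_eq] at hcond
        obtain ⟨⟨hbeq, hE⟩, hG⟩ := hcond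
        have huLen : u < rs.length := by omega
        have hgu : rs.getD u (' ', 0) = rs[u] := List.getD_eq_getElem _ _ huLen
        have hpu : rs[u] = ((rs.getD i (' ', 0)).1, (rs.getD u (' ', 0)).2) := by
          rw [← hbeq, ← hgu]
        have hsplit := sliceR_split rs (i + 1) u j (by omega) hu2 hj
        have hwfsub : WFruns (sliceR rs (i + 1) u ++
            ((rs.getD i (' ', 0)).1, (rs.getD u (' ', 0)).2) :: sliceR rs (u + 1) j) := by
          rw [← hpu, ← hsplit]
          exact sliceR_wf rs (i + 1) j hWF
        obtain ⟨hnewm, hnswr2, hm1⟩ := wf_mid_facts _ _ _ hwfsub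
        have hEiff := ((IH (u - (i + 1)) (by omega) rs hWF (i + 1) u (by omega) rfl).2 (by omega))
        have hGiff := ((IH (j - u) (by omega) rs hWF u j hj rfl).1 (by omega)
          ((rs.getD i (' ', 0)).2 + k))
        have hmidne : decodeR (sliceR rs (i + 1) u) ≠ [] := by
          apply decode_ne_nil _ (fun p hp => (sliceR_wf rs (i + 1) u hWF).1 p hp)
          intro hcon
          have hlc := congrArg List.length hcon
          rw [sliceR_len rs (i + 1) u (by omega) (by omega)] at hlc
          simp at hlc
          omega
        have hdecsp2 : decodeR (sliceR rs (i + 1) j) =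
            decodeR (sliceR rs (i + 1) u) ++
              List.replicate (rs.getD u (' ', 0)).2 (rs.getD i (' ', 0)).1 ++
              decodeR (sliceR rs (u + 1) j) := by
          rw [hsplit, hpu, decodeR_append, decode_cons, ← List.append_assoc]
        have hnswm : NSW (rs.getD i (' ', 0)).1 (decodeR (sliceR rs (i + 1) u)) := by
          have hdecsp : decodeR (sliceR rs (i + 1) j) =
              decodeR (sliceR rs (i + 1) u) ++ decodeR (rs[u] :: sliceR rs (u + 1) j) := by
            rw [hsplit, decodeR_append]
          have := hdecsp ▸ (hgi ▸ hnswR)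
          exact nsw_of_append_left this
        have hGdp := hGiff.mp hG
        rw [hgu, hpu] at hGdp
        have hGdp' : DP (some ((rs.getD i (' ', 0)).1,
            ((rs.getD i (' ', 0)).2 + k) + (rs.getD u (' ', 0)).2))
            (decodeR (sliceR rs (u + 1) j)) := by
          rw [Nat.add_comm ((rs.getD i (' ', 0)).2 + k) ((rs.getD u (' ', 0)).2)]
          exact hGdp
        have hdp := DP.split (rs.getD i (' ', 0)).1 ((rs.getD i (' ', 0)).2 + k)
          (decodeR (sliceR rs (i + 1) u)) (rs.getD u (' ', 0)).2
          (decodeR (sliceR rs (u + 1) j))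
          (by rw [hgi]; omega) hmidne hnswm hnewm hm1 hnswr2 (hEiff.mp hE) hGdp'
        rw [hdecsp2]
        exact hdp
    · intro hdp
      rcases dp_some_inv hdp with ⟨h2, hnsw0, hdpE⟩ |
        ⟨mid, M, rest2, hrest, hN, hne, hnswm, hnewm, hM, hnswr2, hdpmid, hdpG⟩
      · left
        have hEiff := ((IH (j - (i + 1)) (by omega) rs hWF (i + 1) j hj rfl).2 (by omega))
        exact ⟨h2, hEiff.mpr hdpE⟩
      · obtain ⟨l, r, hsp, hmid, hrest2⟩ := runLoc (sliceR rs (i + 1) j) mid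
          (rs.getD i (' ', 0)).1 M rest2 (sliceR_wf rs (i + 1) j hWF) hrest hM hnewm hnswr2
        obtain ⟨hult, hgdu, hslA, hslB⟩ := sliceR_decomp rs (i + 1) j l r _ (by omega) hj hsp
        have hlne : l ≠ [] := by
          intro h0
          apply hne
          rw [hmid, h0]
          rfl
        have hl1 : 1 ≤ l.length := by
          cases l with
          | nil => exact absurd rfl hlne
          | cons _ _ => simp
        right
        refine ⟨i + 1 + l.length, by omega, hult, ?_⟩
        simp only [Bool.and_eq_true, beq_iff_eq]
        refine ⟨⟨by rw [hgdu], ?_⟩, ?_⟩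
        · have hEiff := ((IH (i + 1 + l.length - (i + 1)) (by omega) rs hWF (i + 1)
            (i + 1 + l.length) (by omega) rfl).2 (by omega))
          apply hEiff.mpr
          rw [hslA, ← hmid]
          exact hdpmid
        · have hGiff := ((IH (j - (i + 1 + l.length)) (by omega) rs hWF (i + 1 + l.length) j
            hj rfl).1 (by omega) ((rs.getD i (' ', 0)).2 + k))
          apply hGiff.mpr
          rw [hgdu, hslB, ← hrest2]
          rw [Nat.add_comm M ((rs.getD i (' ', 0)).2 + k)]
          exact hdpG
  have hEpart : i ≤ j → (pvE rs i j = true ↔ DP none (decodeR (sliceR rs i j))) := by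
    intro hij
    rw [pvE.eq_def]
    by_cases he : i = j
    · rw [if_pos he]
      subst he
      rw [sliceR_nil]
      exact ⟨fun _ => by simpa [decodeR] using DP.nil, fun _ => rfl⟩
    · rw [if_neg he]
      have hlt : i < j := by omega
      rw [hGpart hlt 0]
      have hiLen : i < rs.length := by omega
      have hgi : rs.getD i (' ', 0) = rs[i] := List.getD_eq_getElem _ _ hiLen
      have hsl : sliceR rs i j = rs[i] :: sliceR rs (i + 1) j := sliceR_cons rs i j hlt hj
      have hwfsl : WFruns ([] ++ rs[i] :: sliceR rs (i + 1) j) := by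
        rw [List.nil_append, ← hsl]
        exact sliceR_wf rs i j hWF
      obtain ⟨-, hnswR, hn1⟩ := wf_mid_facts [] (sliceR rs (i + 1) j) rs[i] hwfsl
      have hn1' : 1 ≤ (rs.getD i (' ', 0)).2 := by rw [hgi]; exact hn1
      have hnswR' : NSW (rs.getD i (' ', 0)).1 (decodeR (sliceR rs (i + 1) j)) := by
        rw [hgi]
        exact hnswR
      have hdec : decodeR (sliceR rs i j) =
          List.replicate (rs.getD i (' ', 0)).2 (rs.getD i (' ', 0)).1 ++
            decodeR (sliceR rs (i + 1) j) := by
        rw [hsl, show rs[i] = ((rs[i]).1, (rs[i]).2) from rfl, decode_cons, hgi]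
      rw [hdec]
      constructor
      · intro hG
        simp only [Nat.add_zero] at hG
        exact DP.top _ _ _ hn1' hnswR' hG
      · intro hdp
        rcases dp_none_inv hdp with h0 | ⟨c', N', rest', heqq, hN', hnsw', hG'⟩
        · exfalso
          have hlc := congrArg List.length h0
          simp only [List.length_append, List.length_replicate, List.length_nil] at hlc
          omega
        · obtain ⟨hc', hn', hr'⟩ := run_decomp_unique heqq hn1' hN' hnswR' hnsw'
          subst hc'
          subst hn'
          rw [← hr'] at hG'
          simpa using hG'
  exact ⟨hGpart, hEpart⟩

theorem bool_eq_of_iff {a b : Bool} (h : a = true ↔ b = true) : a = b := by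
  cases a <;> cases b <;> simp_all

-- ===== VERDICT (by name: the statement is the Claim_ definition above) =====
theorem can_empty_spec : Claim_equal_can_empty := by
  intro s _
  unfold Spec_can_empty can_empty can_empty_alt
  rw [foldl_pvStep_nil]
  have hWF := WFruns_encodeR s.toList
  have hA : pvCanA s.toList.length s.toList =
      pvCanR (encodeR s.toList).length (encodeR s.toList) := by
    have hlen : s.toList.length = totalLen (encodeR s.toList) := by
      rw [← totalLen_decodeR, decodeR_encodeR]
    calc pvCanA s.toList.length s.toList
        = pvCanA s.toList.length (decodeR (encodeR s.toList)) := by rw [decodeR_encodeR]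
      _ = pvCanR (encodeR s.toList).length (encodeR s.toList) :=
          main_eq (totalLen (encodeR s.toList)) _ _ _ hWF le_rfl (by omega) le_rfl
  rw [hA]
  apply bool_eq_of_iff
  have h1 : pvCanR (encodeR s.toList).length (encodeR s.toList) = true ↔
      EmpS (decodeR (encodeR s.toList)) :=
    ⟨canR_empS _ _ hWF le_rfl, fun h => empS_canR _ h _ _ hWF le_rfl rfl⟩
  have h2 := (portDP ((encodeR s.toList).length - 0) (encodeR s.toList) hWF 0
      (encodeR s.toList).length le_rfl rfl).2 (by omega)
  rw [sliceR_self] at h2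
  exact h1.trans ((Iff.intro (empS_dp _) (fun h => dp_sound none _ h)).trans h2.symm)
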